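-- pv_equiv track=rewrite | github.com/HolaHansi/entropy-scripts | scrape_scripts/speedUp.py | clean_ns
-- ===== SOURCE A (Python) =====
-- allowed_tlds = ['com', 'net', 'org', 'biz', 'info', 'mobi', 'name']
--
-- def concat_ns(ns_list):
--     """
--     given a list known to contain scattered NS name [xxx, ggg, ff.ff, dd.net], produces: "xxx.ggg.ff.ff.dd.net"
--     """
--     toReturn = ""
--     for i in range(len(ns_list)-1):
--         toReturn += (ns_list[i] + '.')
--     toReturn += ns_list[-1]
--     return toReturn
--
-- def clean_ns(ns_list):
--     """
--     NSs are scattered across multiple links in table, so not elements of ns.contents[0] are valid NS names.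
--     We explot that an NS on DNSTrails always looks like xxx.y where y is in allowed_tlds.
--     Hence, we create a new list of Name servers by concatenating the scattered parts of a ns name into single NSs that
--     end in xxx.y where y is in allowed_tlds.
--     WARNING: we're ignoring all Name servers without a tld in allowed_tlds - but that's a problem of scope in the DNStrails db.
--     """
--     if len(ns_list) == 1:
--         return ns_list
--     else:
--         new_ns = []
--         # beginning of new ns
--         k = 0
--         for i in range(len(ns_list)):
--             if '.' in ns_list[i] and ns_list[i].split('.')[-1] in allowed_tlds:
--                 new_ns.append(concat_ns(ns_list[k:i+1]))
--                 k = i + 1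
--         return new_ns
-- ===== SOURCE B (Python) =====
-- allowed_tlds = ['com', 'net', 'org', 'biz', 'info', 'mobi', 'name']
--
-- def clean_ns(ns_list):
--     if len(ns_list) == 1:
--         return ns_list
--     new_ns = []
--     buffer = []
--     for part in ns_list:
--         buffer.append(part)
--         if '.' in part and part.split('.')[-1] in allowed_tlds:
--             new_ns.append('.'.join(buffer))
--             buffer = []
--     return new_ns
-- ===== Notes on version B (the rewrite author's own statement) =====
-- stated objective: simpler
-- what changed: Replaces the start-index pointer, list slicing and the concat_ns helper with a single-pass part buffer that is joined with '.' and reset at each allowed-TLD boundary.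
import Mathlib
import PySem

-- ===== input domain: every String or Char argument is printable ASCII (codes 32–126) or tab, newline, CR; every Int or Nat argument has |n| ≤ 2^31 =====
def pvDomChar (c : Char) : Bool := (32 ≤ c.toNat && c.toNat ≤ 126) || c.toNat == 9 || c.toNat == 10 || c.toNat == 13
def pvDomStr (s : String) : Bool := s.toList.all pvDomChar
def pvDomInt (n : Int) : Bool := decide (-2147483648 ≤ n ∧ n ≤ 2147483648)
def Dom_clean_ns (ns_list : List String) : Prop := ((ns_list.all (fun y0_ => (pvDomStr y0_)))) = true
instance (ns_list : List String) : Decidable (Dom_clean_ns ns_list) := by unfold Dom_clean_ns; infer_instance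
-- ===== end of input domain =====

-- B replaces A's start-index pointer + slice + concat_ns helper by a single-pass part buffer
-- joined with '.' and reset at each allowed-TLD boundary (objective: simpler).

def allowed_tlds : List String := ["com", "net", "org", "biz", "info", "mobi", "name"]

-- the boundary test `'.' in s and s.split('.')[-1] in allowed_tlds`, identical in both Pythons
-- (split? is `some` here since the separator "." is nonempty; [-1] is in range since split is nonempty)
def nsBoundary (s : String) : Bool :=
  PySem.Str.isIn "." s &&
    allowed_tlds.contains ((PySem.List.pyGet? ((PySem.Str.split? s ".").getD []) (-1)).getD "")

-- ===== PORT A =====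
def concat_ns (ns_list : List String) : String :=
  ((PySem.List.pyRange 0 ((ns_list.length : Int) - 1) 1).foldl
      (fun acc i => acc ++ (PySem.List.pyGetD ns_list i "" ++ ".")) "")   -- toReturn after the loop
    ++ (PySem.List.pyGetD ns_list (-1) "")   -- ns_list[-1]; in range at every call site

def clean_ns (ns_list : List String) : List String :=
  if ns_list.length == 1 then ns_list
  else
    let st :=
      (PySem.List.pyRange 0 (ns_list.length : Int) 1).foldl
        (fun (st : List String × Int) i =>
          if nsBoundary (PySem.List.pyGetD ns_list i "") then
            (st.1 ++ [concat_ns (PySem.List.slice ns_list (some st.2) (some (i + 1)))], i + 1)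
          else st)
        ([], 0)
    st.1

-- ===== PORT B =====
def cleanGo (buffer : List String) : List String → List String
  | [] => []
  | part :: rest =>
    let buf := buffer ++ [part]
    if nsBoundary part then PySem.Str.join "." buf :: cleanGo [] rest
    else cleanGo buf rest

def clean_ns_alt (ns_list : List String) : List String :=
  if ns_list.length == 1 then ns_list
  else cleanGo [] ns_list

-- ===== PRECONDITION & SPEC =====
def Spec_clean_ns (ns_list : List String) (out : List String) : Prop := out = clean_ns_alt ns_list
instance (ns_list : List String) (out : List String) : Decidable (Spec_clean_ns ns_list out) := by unfold Spec_clean_ns; infer_instance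

-- ===== CLAIM (what is proved, stated in full; the proofs are below) =====
def Claim_equal_clean_ns : Prop := ∀ (ns_list : List String), Dom_clean_ns ns_list → Spec_clean_ns ns_list (clean_ns ns_list)

-- ===== LEMMAS AND PROOFS =====

-- appending one more element extends the slice
theorem slice_snoc (full : List String) (k j : Nat) (hk : k ≤ j) (hj : j < full.length) :
    PySem.List.slice full (some (k : Int)) (some ((j : Int) + 1))
      = PySem.List.slice full (some (k : Int)) (some (j : Int)) ++ [full[j]] := by
  have h1 : ((j : Int) + 1) = (((j + 1 : Nat)) : Int) := by push_cast; ring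
  rw [h1, PySem.List.slice_natCast, PySem.List.slice_natCast]
  have h2 : j + 1 - k = (j - k) + 1 := by omega
  rw [h2, List.take_add_one]
  have h3 : (full.drop k)[j - k]? = some full[j] := by
    rw [List.getElem?_drop]
    have : k + (j - k) = j := by omega
    rw [this, List.getElem?_eq_getElem hj]
  rw [h3]
  rfl

-- pulling the accumulator out of the dot-appending fold
theorem foldl_dot_acc : ∀ (l : List String) (acc : String),
    l.foldl (fun a s => a ++ (s ++ ".")) acc
      = acc ++ l.foldl (fun a s => a ++ (s ++ ".")) "" := by
  intro l
  induction l with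
  | nil => intro acc; simp
  | cons c tl ih =>
    intro acc
    rw [List.foldl_cons, List.foldl_cons, ih (acc ++ (c ++ ".")), ih ("" ++ (c ++ "."))]
    rw [String.empty_append, String.append_assoc]

-- '.'.join on a snoc list, at the character level
theorem joinC : ∀ (tl : List String) (x : String),
    PySem.Chars.join ".".toList (List.map String.toList (tl ++ [x]))
      = (tl.foldl (fun acc s => acc ++ (s ++ ".")) "").toList ++ x.toList := by
  intro tl
  induction tl with
  | nil => intro x; simp [PySem.Chars.join_singleton]
  | cons a tl ih =>
    intro x
    obtain ⟨y, ys, hy⟩ : ∃ y ys, tl ++ [x] = y :: ys := by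
      cases tl with
      | nil => exact ⟨x, [], rfl⟩
      | cons b tb => exact ⟨b, tb ++ [x], rfl⟩
    rw [List.cons_append, List.map_cons, hy, List.map_cons, PySem.Chars.join_cons_cons,
        ← List.map_cons, ← hy, ih x]
    rw [List.foldl_cons, foldl_dot_acc tl ("" ++ (a ++ "."))]
    simp [String.toList_append, List.append_assoc]

-- '.'.join on a nonempty list equals A's manual concatenation shape
theorem join_snoc (xs : List String) (x : String) :
    PySem.Str.join "." (xs ++ [x])
      = xs.foldl (fun acc s => acc ++ (s ++ ".")) "" ++ x := by
  rw [← String.toList_inj]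
  rw [PySem.Str.toList_join, String.toList_append]
  exact joinC xs x

-- concat_ns on a snoc list is the '.'-join
theorem concat_ns_eq_join (xs : List String) (x : String) :
    concat_ns (xs ++ [x]) = PySem.Str.join "." (xs ++ [x]) := by
  unfold concat_ns
  rw [join_snoc]
  have hlast : PySem.List.pyGetD (xs ++ [x]) (-1) "" = x :=
    PySem.List.pyGetD_neg_one_append_singleton xs x ""
  rw [hlast]
  congr 1
  have hb : ((xs ++ [x]).length : Int) - 1 = ((xs.length : Nat) : Int) := by
    simp
  rw [hb]
  have hcong : (PySem.List.pyRange 0 (xs.length : Int) 1).foldl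
      (fun acc i => acc ++ (PySem.List.pyGetD (xs ++ [x]) i "" ++ ".")) ""
      = (PySem.List.pyRange 0 (xs.length : Int) 1).foldl
      (fun acc i => acc ++ (PySem.List.pyGetD xs i "" ++ ".")) "" := by
    apply PySem.List.foldl_congr_mem
    intro acc i hi
    have hi' := (PySem.List.mem_pyRange_one).1 hi
    have h0 : 0 ≤ i := hi'.1
    have h1 : i < (xs.length : Int) := hi'.2
    rw [PySem.List.pyGetD_eq_getElem (xs ++ [x]) "" h0 (by simp; omega),
        PySem.List.pyGetD_eq_getElem xs "" h0 (by simpa using h1)]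
    have hlt : i.toNat < xs.length := by omega
    congr 2
    exact List.getElem_append_left (by omega)
  rw [hcong]
  simpa using PySem.List.foldl_pyRange_zero_pyGetD xs "" (fun acc s => acc ++ (s ++ ".")) ""

-- the loop invariant: A's fold from index j with pending start k equals acc ++ B's cleanGo
-- on the buffer full[k:j] and the remaining suffix
theorem loop_eq (full : List String) :
    ∀ (n j k : Nat) (acc : List String), full.length - j = n → j ≤ full.length → k ≤ j →
    ((PySem.List.pyRange (j : Int) (full.length : Int) 1).foldl
        (fun (st : List String × Int) i =>
          if nsBoundary (PySem.List.pyGetD full i "") then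
            (st.1 ++ [concat_ns (PySem.List.slice full (some st.2) (some (i + 1)))], i + 1)
          else st)
        (acc, (k : Int))).1
      = acc ++ cleanGo (PySem.List.slice full (some (k : Int)) (some (j : Int))) (full.drop j) := by
  intro n
  induction n with
  | zero =>
    intro j k acc hn hj hk
    have hj' : j = full.length := by omega
    subst hj'
    rw [PySem.List.pyRange_one_eq_nil (le_refl _), List.foldl_nil, List.drop_length]
    simp [cleanGo]
  | succ m ih =>
    intro j k acc hn hj hk
    have hjlt : j < full.length := by omega
    rw [PySem.List.pyRange_one_cons (by exact_mod_cast hjlt), List.foldl_cons]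
    have hget : PySem.List.pyGetD full ((j : Nat) : Int) "" = full[j] := by
      rw [@PySem.List.pyGetD_eq_getElem String full ((j : Nat) : Int) ""
            (by exact_mod_cast Nat.zero_le j) (by exact_mod_cast hjlt)]
      simp
    have hdrop : full.drop j = full[j] :: full.drop (j + 1) :=
      List.drop_eq_getElem_cons hjlt
    have hc1 : ((j : Int) + 1) = (((j + 1 : Nat)) : Int) := by push_cast; ring
    have hs := slice_snoc full k j hk hjlt
    by_cases hb : nsBoundary full[j] = true
    · simp only [hget, hb, if_true]
      rw [hc1, ih (j + 1) (j + 1) _ (by omega) (by omega) (le_refl _)]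
      have hnil : PySem.List.slice full (some (((j + 1 : Nat)) : Int)) (some (((j + 1 : Nat)) : Int)) = [] := by
        rw [PySem.List.slice_natCast]; simp
      rw [hnil, hdrop]
      simp only [cleanGo, hb, if_pos]
      rw [← hc1, hs, concat_ns_eq_join]
      simp
    · simp only [hget, hb, Bool.false_eq_true, if_false]
      rw [hc1, ih (j + 1) k acc (by omega) (by omega) (by omega), hdrop]
      rw [← hc1, hs]
      simp only [cleanGo]
      simp [hb]

-- ===== VERDICT (by name: the statement is the Claim_ definition above) =====
theorem clean_ns_spec : Claim_equal_clean_ns := by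
  intro ns_list _
  unfold Spec_clean_ns clean_ns clean_ns_alt
  by_cases h1 : ns_list.length == 1
  · simp [h1]
  · simp only [h1, if_false, Bool.false_eq_true]
    have h0 : ((0 : Nat) : Int) = 0 := rfl
    have := loop_eq ns_list (ns_list.length) 0 0 [] (by omega) (by omega) (by omega)
    rw [h0] at this
    rw [this]
    have hnil : PySem.List.slice ns_list (some (0 : Int)) (some (0 : Int)) = [] := by
      rw [show ((0:Int)) = (((0:Nat)):Int) from rfl, PySem.List.slice_natCast]; simp
    rw [hnil, List.drop_zero, List.nil_append]
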